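-- pv_equiv track=rewrite | github.com/curtissmith291/django_site | chords_in_key/views.py | note_value
-- ===== SOURCE A (Python) =====
-- value_notes = {1: 'A', 2: 'A#/Bb', 3: 'B', 4: 'C', 5: 'C#/Db', 6: 'D', 7: 'D#/Eb', 8: 'E', 9: 'F',
--     10: 'F#/Gb', 11: 'G', 12: 'G#/Ab'}
--
-- string_values = {'E': 8, 'A': 1, 'D': 6, 'G': 11, 'B': 3, 'e': 8}
--
-- def note_value(string, fret):
--     '''
--     This functon converts the fret number to a numerical note value
--     '''
--     note_num = string_values[string] + fret
--     # checks if number is >12, if so, subtracts 12 until it's 12 or lower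
--     while True:
--         if note_num > 12:
--             note_num = note_num - 12
--             continue
--         else:
--             break
--     note = value_notes[note_num]
--     return note
-- ===== SOURCE B (Python) =====
-- NOTES = ['A', 'A#/Bb', 'B', 'C', 'C#/Db', 'D', 'D#/Eb', 'E',
--          'F', 'F#/Gb', 'G', 'G#/Ab']
--
-- string_values = {'E': 8, 'A': 1, 'D': 6, 'G': 11, 'B': 3, 'e': 8}
--
--
-- def note_value(string, fret):
--     '''Index a 12-element note list with closed-form modular arithmetic (no dict of notes, no loop).'''
--     return NOTES[(string_values[string] + fret - 1) % 12]
-- ===== Notes on version B (the rewrite author's own statement) =====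
-- stated objective: simpler
-- what changed: A's while-loop that repeatedly subtracts 12 plus a dict lookup of the note name is replaced by one modular reduction used directly as an index into a 12-element list of note names.
import Mathlib
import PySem

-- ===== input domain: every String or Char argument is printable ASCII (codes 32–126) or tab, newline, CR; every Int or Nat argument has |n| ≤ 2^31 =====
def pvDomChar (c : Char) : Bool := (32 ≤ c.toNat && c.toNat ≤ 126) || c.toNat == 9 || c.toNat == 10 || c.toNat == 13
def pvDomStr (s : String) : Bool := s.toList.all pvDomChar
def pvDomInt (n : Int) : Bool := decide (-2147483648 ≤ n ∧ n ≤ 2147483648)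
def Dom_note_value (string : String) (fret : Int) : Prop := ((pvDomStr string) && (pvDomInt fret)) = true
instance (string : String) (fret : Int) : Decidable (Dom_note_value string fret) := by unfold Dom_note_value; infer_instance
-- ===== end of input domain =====

-- B indexes a 12-element note list with one modular reduction instead of A's subtraction loop + note dict (simpler; return value only).

def pvStringValues : PySem.Dict String Int := PySem.Dict.ofList
  [("E", 8), ("A", 1), ("D", 6), ("G", 11), ("B", 3), ("e", 8)]

-- ===== PORT A =====
-- A's dict of notes keyed 1..12
def pvValueNotes : PySem.Dict Int String := PySem.Dict.ofList
  [(1, "A"), (2, "A#/Bb"), (3, "B"), (4, "C"), (5, "C#/Db"), (6, "D"), (7, "D#/Eb"), (8, "E"),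
   (9, "F"), (10, "F#/Gb"), (11, "G"), (12, "G#/Ab")]

-- the 'while True: if note_num > 12: subtract 12' loop, step for step
def pvReduce (n : Int) : Int :=
  if n > 12 then pvReduce (n - 12) else n
termination_by n.toNat
decreasing_by omega

def note_value (string : String) (fret : Int) : String :=
  -- KeyError on either dict lookup is excluded by Pre_; defaults are never reached inside Pre_
  let note_num := pvStringValues.getD string 0 + fret
  pvValueNotes.getD (pvReduce note_num) ""

-- ===== PORT B =====
-- B's 12-element list of note names, indexed 0..11
def pvNotes : List String :=
  ["A", "A#/Bb", "B", "C", "C#/Db", "D", "D#/Eb", "E", "F", "F#/Gb", "G", "G#/Ab"]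

def note_value_alt (string : String) (fret : Int) : String :=
  (PySem.List.pyGet? pvNotes
    (PySem.Int.mod (pvStringValues.getD string 0 + fret - 1) 12)).getD ""

-- ===== PRECONDITION & SPEC =====
-- Pre_ excludes exactly the KeyErrors of A: an unknown string name, and a fret so negative
-- that string_values[string] + fret ≤ 0 (then value_notes[note_num] raises).
def Pre_note_value (string : String) (fret : Int) : Prop :=
  pvStringValues.contains string = true ∧ 1 ≤ pvStringValues.getD string 0 + fret
instance (string : String) (fret : Int) : Decidable (Pre_note_value string fret) := by
  unfold Pre_note_value; infer_instance

def pvWitness_note_value : String × Int := ("E", 0)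

def Spec_note_value (string : String) (fret : Int) (out : String) : Prop := out = note_value_alt string fret
instance (string : String) (fret : Int) (out : String) : Decidable (Spec_note_value string fret out) := by unfold Spec_note_value; infer_instance

-- ===== CLAIM =====
def Claim_equal_note_value : Prop := ∀ (string : String) (fret : Int), Dom_note_value string fret → Pre_note_value string fret → Spec_note_value string fret (note_value string fret)

-- ===== LEMMAS AND PROOFS =====
-- A's subtraction loop computes the closed-form modular reduction on every positive input
theorem pvReduce_eq_mod (n : Int) (h : 1 ≤ n) :
    pvReduce n = PySem.Int.mod (n - 1) 12 + 1 := by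
  rw [pvReduce]
  split_ifs with h12
  · rw [pvReduce_eq_mod (n - 12) (by omega)]
    rw [PySem.Int.mod_eq_emod_of_pos (by norm_num), PySem.Int.mod_eq_emod_of_pos (by norm_num)]
    omega
  · rw [PySem.Int.mod_eq_emod_of_pos (by norm_num)]
    omega
termination_by n.toNat
decreasing_by omega

-- the note dict at 1..12 agrees with the note list at 0..11
theorem dict_eq_list (k : Int) (h0 : 0 ≤ k) (h1 : k < 12) :
    pvValueNotes.getD (k + 1) "" = (PySem.List.pyGet? pvNotes k).getD "" := by
  interval_cases k <;> decide

-- ===== VERDICT =====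
theorem note_value_spec : Claim_equal_note_value := by
  intro string fret _ hpre
  unfold Spec_note_value note_value note_value_alt
  simp only []
  rw [pvReduce_eq_mod _ hpre.2, dict_eq_list]
  · have := Int.emod_nonneg (pvStringValues.getD string 0 + fret - 1) (by norm_num : (12:Int) ≠ 0)
    rw [PySem.Int.mod_eq_emod_of_pos (by norm_num)]; omega
  · have := Int.emod_lt_of_pos (pvStringValues.getD string 0 + fret - 1) (by norm_num : (0:Int) < 12)
    rw [PySem.Int.mod_eq_emod_of_pos (by norm_num)]; omega
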